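-- pv_equiv track=rewrite | github.com/Ravinderbaid/interviewbit | Day29/sumDifference.py | solve
-- ===== SOURCE A (Python) =====
-- def solve(A):
--     max=0
--     min=0
--
--     n=len(A)
--     A.sort()
--     for i in range(n):
--         min=(min*2)%1000000007
--         min=(min+A[i])%1000000007
--
--     for i in range(n-1,-1,-1):
--         max=(max*2)%1000000007
--         max=(max+A[i])%1000000007
--
--     return ((max-min+1000000007)%1000000007)
-- ===== SOURCE B (Python) =====
-- def solve(A):
--     A.sort()
--     MOD = 1000000007
--     mx = 0
--     mn = 0
--     p = 1
--     for a, b in zip(A, reversed(A)):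
--         mx = (mx + a * p) % MOD
--         mn = (mn + b * p) % MOD
--         p = p * 2 % MOD
--     return (mx - mn) % MOD
-- ===== Notes on version B (the rewrite author's own statement) =====
-- stated objective: alternative
-- what changed: Replaced the two Horner double-and-add loops (forward and backward over the sorted array) by one fused pass over zip(A, reversed(A)) that maintains a running power of two and accumulates both weighted sums directly, returning (max-min) % MOD without the +MOD adjustment.
import Mathlib
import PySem

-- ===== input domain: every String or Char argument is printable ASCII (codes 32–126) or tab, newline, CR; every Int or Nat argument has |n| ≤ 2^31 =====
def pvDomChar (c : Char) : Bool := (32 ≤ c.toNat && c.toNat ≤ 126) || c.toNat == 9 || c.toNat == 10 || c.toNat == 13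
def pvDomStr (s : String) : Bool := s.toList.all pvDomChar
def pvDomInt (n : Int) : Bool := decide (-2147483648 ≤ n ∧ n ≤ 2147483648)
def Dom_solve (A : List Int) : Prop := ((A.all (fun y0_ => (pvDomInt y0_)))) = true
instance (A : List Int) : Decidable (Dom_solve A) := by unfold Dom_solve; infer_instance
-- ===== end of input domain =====

-- B replaces A's two Horner double-and-add loops by one fused pass over zip(A, reversed(A))
-- maintaining a running power of two (alternative decomposition, same cost).
-- Both A and B sort their argument in place; the equivalence proved is about the return value
-- (the mutation is identical: the same in-place sort).

-- ===== PORT A =====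
def solve (A : List Int) : Int :=
  let n : Int := (A.length : Int)
  let As := PySem.List.sorted A (fun x => x) false
  let mn := (PySem.List.pyRange 0 n 1).foldl
      (fun mn i =>
        let mn := PySem.Int.mod (mn * 2) 1000000007
        PySem.Int.mod (mn + PySem.List.pyGetD As i 0) 1000000007) 0
  let mx := (PySem.List.pyRange (n - 1) (-1) (-1)).foldl
      (fun mx i =>
        let mx := PySem.Int.mod (mx * 2) 1000000007
        PySem.Int.mod (mx + PySem.List.pyGetD As i 0) 1000000007) 0
  PySem.Int.mod (mx - mn + 1000000007) 1000000007

-- ===== PORT B =====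
def solve_alt (A : List Int) : Int :=
  let As := PySem.List.sorted A (fun x => x) false
  let st := (As.zip As.reverse).foldl
      (fun (st : Int × Int × Int) ab =>
        (PySem.Int.mod (st.1 + ab.1 * st.2.2) 1000000007,
         PySem.Int.mod (st.2.1 + ab.2 * st.2.2) 1000000007,
         PySem.Int.mod (st.2.2 * 2) 1000000007)) (0, 0, 1)
  PySem.Int.mod (st.1 - st.2.1) 1000000007

-- ===== PRECONDITION & SPEC =====
def Spec_solve (A : List Int) (out : Int) : Prop := out = solve_alt A
instance (A : List Int) (out : Int) : Decidable (Spec_solve A out) := by unfold Spec_solve; infer_instance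

-- ===== CLAIM (what is proved, stated in full; the proofs are below) =====
def Claim_equal_solve : Prop := ∀ (A : List Int), Dom_solve A → Spec_solve A (solve A)

-- ===== LEMMAS AND PROOFS =====

lemma pvmod (a : Int) : PySem.Int.mod a 1000000007 = a % 1000000007 :=
  PySem.Int.mod_eq_emod_of_pos (by norm_num)

/-- little-endian weighted sum: `pvW [a0,a1,…] = a0 + 2*a1 + 4*a2 + …` -/
def pvW : List Int → Int
  | [] => 0
  | a :: t => a + 2 * pvW t

lemma pvW_append_singleton (u : List Int) (x : Int) :
    pvW (u ++ [x]) = pvW u + x * 2 ^ u.length := by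
  induction u with
  | nil => simp [pvW]
  | cons a t ih => simp [pvW, ih, pow_succ]; ring

lemma pv_modeq_self (n x : Int) : Int.ModEq n (x % n) x :=
  Int.emod_emod_of_dvd x dvd_rfl

lemma pv_mod_add (n x d : Int) : (x % n + d) % n = (x + d) % n :=
  (pv_modeq_self n x).add_right d

lemma pv_mod_mul_add (n x c d : Int) : (x % n * c + d) % n = (x * c + d) % n :=
  ((pv_modeq_self n x).mul_right c).add_right d

lemma pv_mod_add_mul (n x y c : Int) : (x % n + y % n * c) % n = (x + y * c) % n :=
  (pv_modeq_self n x).add ((pv_modeq_self n y).mul_right c)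

lemma pv_mod_mul (n x c : Int) : (x % n * c) % n = (x * c) % n :=
  (pv_modeq_self n x).mul_right c

lemma pv_foldl_comp (g : Int → Int) (f : Int → Int → Int) (l : List Int) (i : Int) :
    l.foldl (fun acc j => f acc (g j)) i = (l.map g).foldl f i := by
  induction l generalizing i <;> simp [*]

lemma horner_spec (ys : List Int) (m : Int) (h : ys ≠ []) :
    ys.foldl (fun acc a => ((acc * 2) % 1000000007 + a) % 1000000007) m
      = (m * 2 ^ ys.length + pvW ys.reverse) % 1000000007 := by
  induction ys generalizing m with
  | nil => exact absurd rfl h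
  | cons a t ih =>
    simp only [List.foldl_cons]
    by_cases ht : t = []
    · subst ht
      simp only [List.foldl_nil, List.reverse_cons, List.reverse_nil, List.nil_append,
        pvW, List.length_cons, List.length_nil]
      rw [pv_mod_add 1000000007 (m * 2) a]
      ring_nf
    · rw [ih _ ht]
      have hrev : pvW ((a :: t).reverse) = pvW t.reverse + a * 2 ^ t.length := by
        rw [List.reverse_cons, pvW_append_singleton, List.length_reverse]
      rw [hrev]
      rw [pv_mod_mul_add 1000000007 ((m * 2) % 1000000007 + a) (2 ^ t.length) (pvW t.reverse)]
      have : ((m * 2) % 1000000007 + a) * 2 ^ t.length + pvW t.reverse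
           = (m * 2) % 1000000007 * 2 ^ t.length + (a * 2 ^ t.length + pvW t.reverse) := by ring
      rw [this, pv_mod_mul_add 1000000007 (m * 2) (2 ^ t.length) _]
      congr 1
      simp [List.length_cons, pow_succ]; ring

lemma foldB_spec (xs ys : List Int) (mx mn p : Int)
    (hlen : xs.length = ys.length) (hne : xs ≠ []) :
    (xs.zip ys).foldl
        (fun (st : Int × Int × Int) ab =>
          ((st.1 + ab.1 * st.2.2) % 1000000007,
           (st.2.1 + ab.2 * st.2.2) % 1000000007,
           (st.2.2 * 2) % 1000000007)) (mx, mn, p)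
      = ((mx + p * pvW xs) % 1000000007,
         (mn + p * pvW ys) % 1000000007,
         (p * 2 ^ xs.length) % 1000000007) := by
  induction xs generalizing ys mx mn p with
  | nil => exact absurd rfl hne
  | cons a t ih =>
    cases ys with
    | nil => simp at hlen
    | cons b u =>
      simp only [List.zip_cons_cons, List.foldl_cons]
      by_cases ht : t = []
      · subst ht
        have hu : u = [] := by simpa using hlen
        subst hu
        simp only [List.zip_nil_left, List.foldl_nil, pvW, List.length_cons, List.length_nil]
        refine congrArg₂ Prod.mk (by ring_nf) (congrArg₂ Prod.mk (by ring_nf) (by ring_nf))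
      · have hlen' : t.length = u.length := by simpa using hlen
        rw [ih u _ _ _ hlen' ht]
        simp only [pvW, List.length_cons]
        refine congrArg₂ Prod.mk ?_ (congrArg₂ Prod.mk ?_ ?_)
        · rw [pv_mod_add_mul]; ring_nf
        · rw [pv_mod_add_mul]; ring_nf
        · rw [pv_mod_mul]; ring_nf

-- ===== VERDICT (by name: the statement is the Claim_ definition above) =====
theorem solve_spec : Claim_equal_solve := by
  intro A _
  unfold Spec_solve solve solve_alt
  simp only [pvmod]
  set S := PySem.List.sorted A (fun x => x) false with hS
  have hlen : S.length = A.length := PySem.List.length_sorted ..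
  by_cases hne : S = []
  · have hperm := PySem.List.sorted_perm A (fun x => x) false
    rw [← hS, hne] at hperm
    have hA : A = [] := hperm.symm.eq_nil
    subst hA
    decide
  · rw [← hlen]
    rw [PySem.List.foldl_pyRange_zero_pyGetD' S 0
      (fun acc a => ((acc * 2) % 1000000007 + a) % 1000000007) 0]
    have hrange : PySem.List.pyRange ((S.length : Int) - 1) (-1) (-1)
        = (PySem.List.pyRange 0 (S.length : Int) 1).reverse := by
      rw [PySem.List.pyRange_neg_one_eq_reverse]; norm_num
    rw [hrange,
      pv_foldl_comp (fun j => PySem.List.pyGetD S j 0)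
        (fun acc a => ((acc * 2) % 1000000007 + a) % 1000000007),
      List.map_reverse, PySem.List.map_pyGetD_pyRange_zero']
    rw [horner_spec S 0 hne, horner_spec S.reverse 0 (by simpa using hne)]
    rw [foldB_spec S S.reverse 0 0 1 (by simp) hne]
    simp only [List.reverse_reverse, zero_mul, zero_add, one_mul]
    omega
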